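-- pv_equiv track=rewrite | github.com/a4z/conan-center-index | tools/helpers.py | is_reference_name
-- ===== SOURCE A (Python) =====
-- def is_reference_name(reference: str) -> bool:
--     """ Checks if a given reference is a valid reference name
--         This might not implement 100% of all conan naming rules, but only those we use
--
--         Avalid reference is either name/version@ or name/version@user/channel
--     """
--     name_channel = reference.split("@")
--     if len(name_channel) != 2:
--         return False
--     name_version = name_channel[0].split("/")
--     if len(name_version) != 2:
--         return False
--     if not all(part for part in name_version):
--         return False
--     if name_channel[1]:
--         user_channel = name_channel[1].split("/")
--         if len(user_channel) != 2:
--             return False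
--         if not all(part for part in user_channel):
--             return False
--     return True
-- ===== SOURCE B (Python) =====
-- def is_reference_name(reference: str) -> bool:
--     # Single left-to-right scan (state machine), no splitting/allocation:
--     # state 0=name, 1=version, 2=user, 3=channel; seen = current segment nonempty.
--     state = 0
--     seen = False
--     for c in reference:
--         if c == "/":
--             if (state == 0 or state == 2) and seen:
--                 state += 1
--                 seen = False
--             else:
--                 return False
--         elif c == "@":
--             if state == 1 and seen:
--                 state = 2
--                 seen = False
--             else:
--                 return False
--         else:
--             seen = True
--     return (state == 2 and not seen) or (state == 3 and seen)
-- ===== Notes on version B (the rewrite author's own statement) =====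
-- stated objective: alternative
-- what changed: Replaces the three-stage split('@')/split('/')/emptiness checks with a single left-to-right character scan driven by a four-state machine (name/version/user/channel) that never builds intermediate lists.
import Mathlib
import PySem

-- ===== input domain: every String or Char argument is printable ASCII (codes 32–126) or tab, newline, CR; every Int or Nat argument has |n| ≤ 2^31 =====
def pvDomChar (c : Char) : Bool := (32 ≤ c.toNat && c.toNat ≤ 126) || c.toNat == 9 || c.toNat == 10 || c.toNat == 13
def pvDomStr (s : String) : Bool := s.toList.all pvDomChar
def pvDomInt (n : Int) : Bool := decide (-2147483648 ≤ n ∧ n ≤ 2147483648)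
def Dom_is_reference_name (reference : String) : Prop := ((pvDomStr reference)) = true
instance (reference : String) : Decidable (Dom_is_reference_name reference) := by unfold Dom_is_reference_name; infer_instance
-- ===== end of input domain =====

-- B replaces A's staged split('@')/split('/')/emptiness checks with one left-to-right
-- four-state character scan (alternative algorithm, no intermediate lists; same O(n) cost).

-- ===== PORT A =====
def is_reference_name (reference : String) : Bool :=
  let name_channel := PySem.Chars.splitOn reference.toList ['@']
  if name_channel.length ≠ 2 then false
  else
    let name_version := PySem.Chars.splitOn (name_channel.getD 0 []) ['/']
    if name_version.length ≠ 2 then false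
    else if ¬ (name_version.all (fun part => !part.isEmpty)) then false
    else if !(name_channel.getD 1 []).isEmpty then
      let user_channel := PySem.Chars.splitOn (name_channel.getD 1 []) ['/']
      if user_channel.length ≠ 2 then false
      else if ¬ (user_channel.all (fun part => !part.isEmpty)) then false
      else true
    else true

-- ===== PORT B =====
-- state 0=name, 1=version, 2=user, 3=channel; seen = current segment nonempty
def irnScan : List Char → Nat → Bool → Bool
  | [], st, seen => (st == 2 && !seen) || (st == 3 && seen)
  | c :: rest, st, seen =>
    if c = '/' then
      if (st == 0 || st == 2) && seen then irnScan rest (st + 1) false else false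
    else if c = '@' then
      if st == 1 && seen then irnScan rest 2 false else false
    else irnScan rest st true

def is_reference_name_alt (reference : String) : Bool :=
  irnScan reference.toList 0 false

-- ===== PRECONDITION & SPEC =====
def Spec_is_reference_name (reference : String) (out : Bool) : Prop := out = is_reference_name_alt reference
instance (reference : String) (out : Bool) : Decidable (Spec_is_reference_name reference out) := by unfold Spec_is_reference_name; infer_instance

-- ===== CLAIM (what is proved, stated in full; the proofs are below) =====
def Claim_equal_is_reference_name : Prop := ∀ (reference : String), Dom_is_reference_name reference → Spec_is_reference_name reference (is_reference_name reference)

-- ===== LEMMAS AND PROOFS =====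

-- prepend a piece onto the head of a split result
def irnPrep (p : List Char) : List (List Char) → List (List Char)
  | [] => [p]
  | h :: t => (p ++ h) :: t

-- clean recursion computing splitOn with a one-char separator
def splitOn1 (c : Char) : List Char → List (List Char)
  | [] => [[]]
  | a :: r => if a = c then [] :: splitOn1 c r else irnPrep [a] (splitOn1 c r)

-- no '/' and no '@'
def irnClean (cs : List Char) : Bool := cs.all (fun x => !(x == '/') && !(x == '@'))

theorem splitOn1_ne_nil (c : Char) (r : List Char) : splitOn1 c r ≠ [] := by
  induction r with
  | nil => simp [splitOn1]
  | cons a r ih =>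
    simp only [splitOn1]
    split
    · simp
    · cases h : splitOn1 c r with
      | nil => exact absurd h ih
      | cons x t => simp [irnPrep]

theorem irnPrep_irnPrep (p q : List Char) (s : List (List Char)) (hs : s ≠ []) :
    irnPrep p (irnPrep q s) = irnPrep (p ++ q) s := by
  cases s with
  | nil => exact absurd rfl hs
  | cons h t => simp [irnPrep, List.append_assoc]

theorem irn_go_eq (c : Char) :
    ∀ (l : List Char) (fuel : Nat), l.length < fuel → ∀ (cur : List Char) (acc : List (List Char)),
      PySem.Chars.splitOn.go [c] fuel l cur acc = acc.reverse ++ irnPrep cur.reverse (splitOn1 c l) := by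
  intro l
  induction l with
  | nil =>
    intro fuel hf cur acc
    cases fuel with
    | zero => omega
    | succ f =>
      simp [PySem.Chars.splitOn.go, splitOn1, irnPrep]
  | cons a r ih =>
    intro fuel hf cur acc
    cases fuel with
    | zero => omega
    | succ f =>
      by_cases hac : a = c
      · subst hac
        have hpre : List.isPrefixOf [a] (a :: r) = true := by simp [List.isPrefixOf]
        simp only [PySem.Chars.splitOn.go, hpre, if_true, List.length_cons, List.length_nil,
          List.drop_succ_cons, List.drop_zero]
        rw [ih f (by simpa using Nat.lt_of_succ_lt_succ hf) [] (cur.reverse :: acc)]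
        simp only [splitOn1, if_pos rfl]
        cases h : splitOn1 a r with
        | nil => exact absurd h (splitOn1_ne_nil a r)
        | cons x t => simp [irnPrep]
      · have hpre : List.isPrefixOf [c] (a :: r) = false := by
          simp [List.isPrefixOf]
          exact fun h => absurd h.symm hac
        simp only [PySem.Chars.splitOn.go, hpre, Bool.false_eq_true, if_false]
        rw [ih f (by simpa using Nat.lt_of_succ_lt_succ hf) (a :: cur) acc]
        simp only [splitOn1, if_neg hac, List.reverse_cons]
        rw [irnPrep_irnPrep _ _ _ (splitOn1_ne_nil c r)]

theorem splitOn_eq_splitOn1 (c : Char) (cs : List Char) :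
    PySem.Chars.splitOn cs [c] = splitOn1 c cs := by
  show PySem.Chars.splitOn.go [c] (cs.length + 1) cs [] [] = _
  rw [irn_go_eq c cs (cs.length + 1) (by omega) [] []]
  cases h : splitOn1 c cs with
  | nil => exact absurd h (splitOn1_ne_nil c cs)
  | cons x t => simp [irnPrep]

theorem mem_splitOn1 (c : Char) (r : List Char) :
    ∀ u ∈ splitOn1 c r, c ∉ u ∧ ∀ x ∈ u, x ∈ r := by
  induction r with
  | nil => intro u hu; simp [splitOn1] at hu; simp [hu]
  | cons a r ih =>
    intro u hu
    simp only [splitOn1] at hu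
    by_cases hac : a = c
    · rw [if_pos hac] at hu
      rcases List.mem_cons.mp hu with h | h
      · simp [h]
      · obtain ⟨h1, h2⟩ := ih u h
        exact ⟨h1, fun x hx => List.mem_cons_of_mem a (h2 x hx)⟩
    · rw [if_neg hac] at hu
      cases hs : splitOn1 c r with
      | nil => exact absurd hs (splitOn1_ne_nil c r)
      | cons h t =>
        rw [hs] at hu
        simp only [irnPrep, List.singleton_append] at hu
        rcases List.mem_cons.mp hu with h' | h'
        · subst h'
          obtain ⟨h1, h2⟩ := ih h (by rw [hs]; exact List.mem_cons_self)
          constructor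
          · intro hc
            rcases List.mem_cons.mp hc with h'' | h''
            · exact hac h''.symm
            · exact h1 h''
          · intro x hx
            rcases List.mem_cons.mp hx with h'' | h''
            · subst h''; exact List.mem_cons_self
            · exact List.mem_cons_of_mem a (h2 x h'')
        · obtain ⟨h1, h2⟩ := ih u (by rw [hs]; exact List.mem_cons_of_mem _ h')
          exact ⟨h1, fun x hx => List.mem_cons_of_mem a (h2 x hx)⟩

theorem splitOn1_of_not_mem (c : Char) (r : List Char) (h : c ∉ r) : splitOn1 c r = [r] := by
  induction r with
  | nil => simp [splitOn1]
  | cons a r ih =>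
    have hac : a ≠ c := fun he => h (he ▸ List.mem_cons_self)
    have hr : c ∉ r := fun hm => h (List.mem_cons_of_mem a hm)
    simp [splitOn1, if_neg hac, ih hr, irnPrep]

theorem two_le_of_mem (c : Char) (r : List Char) (h : c ∈ r) : 2 ≤ (splitOn1 c r).length := by
  induction r with
  | nil => simp at h
  | cons a r ih =>
    simp only [splitOn1]
    by_cases hac : a = c
    · rw [if_pos hac]
      have := splitOn1_ne_nil c r
      cases hs : splitOn1 c r with
      | nil => exact absurd hs this
      | cons x t => simp
    · rw [if_neg hac]
      have hr : c ∈ r := by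
        rcases List.mem_cons.mp h with h' | h'
        · exact absurd h'.symm hac
        · exact h'
      cases hs : splitOn1 c r with
      | nil => exact absurd hs (splitOn1_ne_nil c r)
      | cons x t =>
        have := ih hr
        rw [hs] at this
        simpa [irnPrep] using this

theorem splitOn1_single (c : Char) (r u : List Char) (h : splitOn1 c r = [u]) :
    u = r ∧ c ∉ r := by
  by_cases hm : c ∈ r
  · have := two_le_of_mem c r hm
    rw [h] at this
    simp at this
  · rw [splitOn1_of_not_mem c r hm] at h
    exact ⟨(List.cons.injEq _ _ _ _ ▸ h).1.symm ▸ rfl, hm⟩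

theorem irnClean_false_of_mem (r : List Char) (h : '/' ∈ r) : irnClean r = false := by
  simp only [irnClean, List.all_eq_false]
  exact ⟨'/', h, by decide⟩

-- once '@' has been consumed (states 2/3), another '@' always fails
theorem scan3_at (r : List Char) (h : '@' ∈ r) (seen : Bool) : irnScan r 3 seen = false := by
  induction r generalizing seen with
  | nil => simp at h
  | cons a r ih =>
    simp only [irnScan]
    by_cases h1 : a = '/'
    · simp [h1]
    · by_cases h2 : a = '@'
      · simp [h1, h2]
      · have hr : '@' ∈ r := by
          rcases List.mem_cons.mp h with h' | h'
          · exact absurd h'.symm h2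
          · exact h'
        simp [h1, h2, ih hr]

theorem scan2_at (r : List Char) (h : '@' ∈ r) (seen : Bool) : irnScan r 2 seen = false := by
  induction r generalizing seen with
  | nil => simp at h
  | cons a r ih =>
    simp only [irnScan]
    by_cases h1 : a = '/'
    · have hr : '@' ∈ r := by
        rcases List.mem_cons.mp h with h' | h'
        · exact absurd (h1 ▸ h'.symm) (by decide)
        · exact h'
      cases seen with
      | true => simp [h1, scan3_at r hr]
      | false => simp [h1]
    · by_cases h2 : a = '@'
      · simp [h1, h2]
      · have hr : '@' ∈ r := by
          rcases List.mem_cons.mp h with h' | h'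
          · exact absurd h'.symm h2
          · exact h'
        simp [h1, h2, ih hr]

-- state 3: remaining chars must be a nonempty clean channel (unless already seen)
theorem scanL3 (cs : List Char) (seen : Bool) :
    irnScan cs 3 seen = ((seen || decide (cs ≠ [])) && irnClean cs) := by
  induction cs generalizing seen with
  | nil => cases seen <;> simp [irnScan, irnClean]
  | cons a r ih =>
    simp only [irnScan]
    by_cases h1 : a = '/'
    · simp [h1, irnClean]
    · by_cases h2 : a = '@'
      · simp [h1, h2, irnClean]
      · simp only [h1, h2, if_false, ih true]
        simp [irnClean, h1, h2]

-- state 2: closed form in terms of the '/'-split of the rest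
theorem scanL2 (cs : List Char) (seen : Bool) :
    irnScan cs 2 seen =
      (match splitOn1 '/' cs with
       | [_] => decide (cs = []) && !seen
       | [u, v] => (seen || decide (u ≠ [])) && irnClean u && decide (v ≠ []) && irnClean v
       | _ => false) := by
  induction cs generalizing seen with
  | nil => cases seen <;> simp [irnScan, splitOn1]
  | cons a r ih =>
    by_cases h1 : a = '/'
    · subst h1
      simp only [splitOn1, if_pos rfl]
      cases seen with
      | false =>
        simp only [irnScan]
        cases hsp : splitOn1 '/' r with
        | nil => exact absurd hsp (splitOn1_ne_nil '/' r)
        | cons u t =>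
          cases t with
          | nil => simp
          | cons v t2 => cases t2 <;> simp
      | true =>
        simp only [irnScan, if_pos rfl]
        rw [if_pos (by decide : (((2:Nat) == 0 || (2:Nat) == 2) && true) = true), scanL3 r false]
        cases hsp : splitOn1 '/' r with
        | nil => exact absurd hsp (splitOn1_ne_nil '/' r)
        | cons u t =>
          cases t with
          | nil =>
            obtain ⟨hu, hnm⟩ := splitOn1_single '/' r u hsp
            subst hu
            simp [irnClean]
          | cons v t2 =>
            have hm : '/' ∈ r := by
              by_contra hnm
              rw [splitOn1_of_not_mem '/' r hnm] at hsp
              simp at hsp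
            cases t2 <;> simp [irnClean_false_of_mem r hm]
    · by_cases h2 : a = '@'
      · subst h2
        simp only [irnScan, if_neg h1, if_pos rfl]
        rw [if_neg (by simp : ¬ (((2:Nat) == 1 && seen) = true))]
        simp only [splitOn1, if_neg h1]
        cases hsp : splitOn1 '/' r with
        | nil => exact absurd hsp (splitOn1_ne_nil '/' r)
        | cons u t =>
          cases t with
          | nil => simp [irnPrep]
          | cons v t2 =>
            cases t2 with
            | nil => simp [irnPrep, irnClean]
            | cons w t3 => simp [irnPrep]
      · simp only [irnScan, if_neg h1, if_neg h2, ih true]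
        simp only [splitOn1, if_neg h1]
        cases hsp : splitOn1 '/' r with
        | nil => exact absurd hsp (splitOn1_ne_nil '/' r)
        | cons u t =>
          cases t with
          | nil => simp [irnPrep]
          | cons v t2 =>
            cases t2 with
            | nil => simp [irnPrep, irnClean, show (a == '/') = false by simp [h1], show (a == '@') = false by simp [h2]]
            | cons w t3 => simp [irnPrep]

-- state 1: closed form in terms of the '@'-split of the rest
theorem scanL1 (cs : List Char) (seen : Bool) :
    irnScan cs 1 seen =
      (match splitOn1 '@' cs with
       | [u, v] => (seen || decide (u ≠ [])) && irnClean u && irnScan v 2 false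
       | _ => false) := by
  induction cs generalizing seen with
  | nil => cases seen <;> simp [irnScan, splitOn1]
  | cons a r ih =>
    by_cases h1 : a = '/'
    · subst h1
      simp only [irnScan, if_pos rfl]
      rw [if_neg (by simp : ¬ ((((1:Nat) == 0 || (1:Nat) == 2) && seen) = true))]
      simp only [splitOn1, if_neg (by decide : ¬ ('/' : Char) = '@')]
      cases hsp : splitOn1 '@' r with
      | nil => exact absurd hsp (splitOn1_ne_nil '@' r)
      | cons u t =>
        cases t with
        | nil => simp [irnPrep]
        | cons v t2 =>
          cases t2 with
          | nil => simp [irnPrep, irnClean]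
          | cons w t3 => simp [irnPrep]
    · by_cases h2 : a = '@'
      · subst h2
        simp only [irnScan, if_neg h1, if_pos rfl]
        simp only [splitOn1, if_pos rfl]
        cases seen with
        | false =>
          rw [if_neg (by decide : ¬ (((1:Nat) == 1 && false) = true))]
          cases hsp : splitOn1 '@' r with
          | nil => exact absurd hsp (splitOn1_ne_nil '@' r)
          | cons u t =>
            cases t with
            | nil => simp
            | cons v t2 => cases t2 <;> simp
        | true =>
          rw [if_pos (by decide : (((1:Nat) == 1 && true) = true))]
          cases hsp : splitOn1 '@' r with
          | nil => exact absurd hsp (splitOn1_ne_nil '@' r)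
          | cons u t =>
            cases t with
            | nil =>
              obtain ⟨hu, hnm⟩ := splitOn1_single '@' r u hsp
              subst hu
              simp [irnClean]
            | cons v t2 =>
              have hm : '@' ∈ r := by
                by_contra hnm
                rw [splitOn1_of_not_mem '@' r hnm] at hsp
                simp at hsp
              cases t2 <;> simp [scan2_at r hm]
      · simp only [irnScan, if_neg h1, if_neg h2, ih true]
        simp only [splitOn1, if_neg h2]
        cases hsp : splitOn1 '@' r with
        | nil => exact absurd hsp (splitOn1_ne_nil '@' r)
        | cons u t =>
          cases t with
          | nil => simp [irnPrep]
          | cons v t2 =>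
            cases t2 with
            | nil => simp [irnPrep, irnClean, show (a == '/') = false by simp [h1], show (a == '@') = false by simp [h2]]
            | cons w t3 => simp [irnPrep]

-- state 0: full closed form
theorem scanL0 (cs : List Char) (seen : Bool) :
    irnScan cs 0 seen =
      (match splitOn1 '@' cs with
       | [u, v] =>
         (match splitOn1 '/' u with
          | [p, q] => (seen || decide (p ≠ [])) && irnClean p && decide (q ≠ []) && irnClean q
          | _ => false) && irnScan v 2 false
       | _ => false) := by
  induction cs generalizing seen with
  | nil => cases seen <;> simp [irnScan, splitOn1]
  | cons a r ih =>
    by_cases h1 : a = '/'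
    · subst h1
      simp only [irnScan, if_pos rfl]
      simp only [splitOn1, if_neg (by decide : ¬ ('/' : Char) = '@')]
      cases seen with
      | false =>
        rw [if_neg (by decide : ¬ ((((0:Nat) == 0 || (0:Nat) == 2) && false) = true))]
        cases hsp : splitOn1 '@' r with
        | nil => exact absurd hsp (splitOn1_ne_nil '@' r)
        | cons u t =>
          cases t with
          | nil => simp [irnPrep]
          | cons v t2 =>
            cases t2 with
            | nil =>
              simp only [irnPrep, List.singleton_append]
              simp only [splitOn1, if_pos rfl]
              cases hsp2 : splitOn1 '/' u with
              | nil => exact absurd hsp2 (splitOn1_ne_nil '/' u)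
              | cons p t3 =>
                cases t3 with
                | nil => simp
                | cons q t4 => cases t4 <;> simp
            | cons w t3 => simp [irnPrep]
      | true =>
        rw [if_pos (by decide : ((((0:Nat) == 0 || (0:Nat) == 2) && true) = true)), scanL1 r false]
        cases hsp : splitOn1 '@' r with
        | nil => exact absurd hsp (splitOn1_ne_nil '@' r)
        | cons u t =>
          cases t with
          | nil => simp [irnPrep]
          | cons v t2 =>
            cases t2 with
            | nil =>
              simp only [irnPrep, List.singleton_append]
              simp only [splitOn1, if_pos rfl]
              cases hsp2 : splitOn1 '/' u with
              | nil => exact absurd hsp2 (splitOn1_ne_nil '/' u)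
              | cons p t3 =>
                cases t3 with
                | nil =>
                  obtain ⟨hp, hnm⟩ := splitOn1_single '/' u p hsp2
                  subst hp
                  simp [irnClean]
                | cons q t4 =>
                  have hm : '/' ∈ u := by
                    by_contra hnm
                    rw [splitOn1_of_not_mem '/' u hnm] at hsp2
                    simp at hsp2
                  cases t4 <;> simp [irnClean_false_of_mem u hm]
            | cons w t3 => simp [irnPrep]
    · by_cases h2 : a = '@'
      · subst h2
        simp only [irnScan, if_neg h1, if_pos rfl]
        rw [if_neg (by simp : ¬ (((0:Nat) == 1 && seen) = true))]
        simp only [splitOn1, if_pos rfl]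
        cases hsp : splitOn1 '@' r with
        | nil => exact absurd hsp (splitOn1_ne_nil '@' r)
        | cons u t =>
          cases t with
          | nil => simp [splitOn1]
          | cons v t2 => cases t2 <;> simp
      · simp only [irnScan, if_neg h1, if_neg h2, ih true]
        simp only [splitOn1, if_neg h2]
        cases hsp : splitOn1 '@' r with
        | nil => exact absurd hsp (splitOn1_ne_nil '@' r)
        | cons u t =>
          cases t with
          | nil => simp [irnPrep]
          | cons v t2 =>
            cases t2 with
            | nil =>
              simp only [irnPrep, List.singleton_append]
              simp only [splitOn1, if_neg h1]
              cases hsp2 : splitOn1 '/' u with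
              | nil => exact absurd hsp2 (splitOn1_ne_nil '/' u)
              | cons p t3 =>
                cases t3 with
                | nil => simp [irnPrep]
                | cons q t4 =>
                  cases t4 with
                  | nil => simp [irnPrep, irnClean, show (a == '/') = false by simp [h1], show (a == '@') = false by simp [h2]]
                  | cons w t5 => simp [irnPrep]
            | cons w t3 => simp [irnPrep]

theorem irnClean_of_pieces {c c' : Char} {r u : List Char} (hu : u ∈ splitOn1 c r)
    (hc : c = '/' ∨ c = '@') (hc' : c' = '/' ∨ c' = '@') (hcc : c ≠ c')
    (hr : c' ∉ r) : irnClean u = true := by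
  obtain ⟨h1, h2⟩ := mem_splitOn1 c r u hu
  simp only [irnClean, List.all_eq_true]
  intro x hx
  have hxc : x ≠ c := fun he => h1 (he ▸ hx)
  have hxc' : x ≠ c' := fun he => hr (he ▸ h2 x hx)
  rcases hc with rfl | rfl <;> rcases hc' with rfl | rfl <;>
    first
    | exact absurd rfl hcc
    | simp [hxc, hxc']

-- ===== VERDICT (by name: the statement is the Claim_ definition above) =====
theorem is_reference_name_spec : Claim_equal_is_reference_name := by
  intro reference _
  unfold Spec_is_reference_name is_reference_name_alt
  rw [scanL0]
  cases hsp : splitOn1 '@' reference.toList with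
  | nil => exact absurd hsp (splitOn1_ne_nil '@' reference.toList)
  | cons u t =>
    cases t with
    | nil => simp [is_reference_name, splitOn_eq_splitOn1, hsp]
    | cons v t2 =>
      cases t2 with
      | nil =>
        have huat : '@' ∉ u := (mem_splitOn1 '@' reference.toList u
          (by rw [hsp]; exact List.mem_cons_self)).1
        have hvat : '@' ∉ v := (mem_splitOn1 '@' reference.toList v
          (by rw [hsp]; exact List.mem_cons_of_mem _ List.mem_cons_self)).1
        have hcu : ∀ p ∈ splitOn1 '/' u, irnClean p = true := fun p hp =>
          irnClean_of_pieces hp (Or.inl rfl) (Or.inr rfl) (by decide) huat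
        have hcv : ∀ p ∈ splitOn1 '/' v, irnClean p = true := fun p hp =>
          irnClean_of_pieces hp (Or.inl rfl) (Or.inr rfl) (by decide) hvat
        simp only [is_reference_name, splitOn_eq_splitOn1, hsp]
        rw [scanL2 v false]
        cases hs2 : splitOn1 '/' u with
        | nil => exact absurd hs2 (splitOn1_ne_nil '/' u)
        | cons p t3 =>
          cases t3 with
          | nil => simp [hs2]
          | cons q t4 =>
            cases t4 with
            | nil =>
              have hcp : irnClean p = true := hcu p (by rw [hs2]; exact List.mem_cons_self)
              have hcq : irnClean q = true := hcu q
                (by rw [hs2]; exact List.mem_cons_of_mem _ List.mem_cons_self)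
              cases hs3 : splitOn1 '/' v with
              | nil => exact absurd hs3 (splitOn1_ne_nil '/' v)
              | cons x t5 =>
                cases t5 with
                | nil =>
                  obtain ⟨hx, hnm⟩ := splitOn1_single '/' v x hs3
                  rw [hx] at hs3
                  by_cases hv : v = []
                  · simp [hcp, hcq, hs2, hs3, hv]
                  · simp [hcp, hcq, hs2, hs3, hv]
                | cons y t6 =>
                  have hvne : v ≠ [] := by
                    intro he
                    rw [he] at hs3
                    simp [splitOn1] at hs3
                  cases t6 with
                  | nil =>
                    have hcx : irnClean x = true := hcv x (by rw [hs3]; exact List.mem_cons_self)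
                    have hcy : irnClean y = true := hcv y
                      (by rw [hs3]; exact List.mem_cons_of_mem _ List.mem_cons_self)
                    simp [hcp, hcq, hcx, hcy, hvne, hs2, hs3]
                  | cons z t7 => simp [hcp, hcq, hvne, hs2, hs3]
            | cons w t5 => simp [hs2]
      | cons w t3 => simp [is_reference_name, splitOn_eq_splitOn1, hsp]
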